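-- pv_equiv track=rewrite | github.com/stonemoose/advent_of_code | 2023/04/solver.py | solve
-- ===== SOURCE A (Python) =====
-- def solve(input_data):
--     text = [line.split(":")[1] for line in input_data.split("\n")]
--
--     part1 = 0
--     part2 = [1 for _ in range(len(text))]
--     for i, games in enumerate(text):
--         winning, numbers = [set(x.strip().split()) for x in games.split("|")]
--         if len(winning & numbers):
--             part1 += 2 ** (len(winning & numbers) - 1)
--             for n in range(1, len(winning & numbers) + 1):
--                 part2[i + n] += part2[i]
--
--     part2 = sum(part2)
--     return part1, part2
-- ===== SOURCE B (Python) =====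
-- def solve(input_data):
--     matches = []
--     for line in input_data.split("\n"):
--         games = line.split(":")[1]
--         winning, numbers = [set(x.strip().split()) for x in games.split("|")]
--         matches.append(len(winning & numbers))
--
--     part1 = sum(2 ** (m - 1) for m in matches if m)
--
--     n = len(matches)
--     counts = [0] * n
--     for i in range(n - 1, -1, -1):
--         counts[i] = 1 + sum(counts[i + 1 : i + 1 + matches[i]])
--
--     return part1, sum(counts)
-- ===== Notes on version B (the rewrite author's own statement) =====
-- stated objective: alternative
-- what changed: B first builds a per-card match-count list, computes part1 by summing 2**(m-1) over it, and computes part2 with a backward dynamic program counts[i] = 1 + sum(counts[i+1:i+1+matches[i]]) instead of A's forward in-place copy propagation into later slots.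
-- outside the precondition, e.g. on solve('A: 1 | 1'): A raises IndexError, B returns (1, 1); on solve(':'): A raises ValueError, B raises ValueError; on solve('|'): A raises IndexError, B raises IndexError
-- crash fix: On inputs that parse (every line has a ':' and exactly one '|' after it) but where some card's match count runs past the last card, A raises IndexError writing part2[i+n] while B's backward slice clamps and returns the scratchcard totals for the cards that exist. — e.g. on solve("A: 1 | 1"): A raises IndexError, B returns (1, 1)
import Mathlib
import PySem

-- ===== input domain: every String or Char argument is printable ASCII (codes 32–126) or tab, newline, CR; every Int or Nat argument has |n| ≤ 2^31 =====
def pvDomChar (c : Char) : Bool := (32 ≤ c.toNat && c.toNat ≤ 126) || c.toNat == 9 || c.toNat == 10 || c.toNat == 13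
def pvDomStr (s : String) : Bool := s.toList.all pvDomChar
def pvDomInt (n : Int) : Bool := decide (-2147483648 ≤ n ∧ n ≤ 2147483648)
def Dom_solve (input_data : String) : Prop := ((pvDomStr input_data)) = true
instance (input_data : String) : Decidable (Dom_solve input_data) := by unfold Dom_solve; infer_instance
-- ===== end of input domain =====

-- B replaces A's forward in-place copy propagation by a match-count list, a part1 sum over it,
-- and a backward dynamic program for part2 (alternative decomposition, same cost; return value only).

-- ===== PORT A =====
def solve (input_data : String) : Int × Int :=
  let text := ((PySem.Str.split? input_data "\n").getD []).map
      (fun line => (PySem.List.pyGet? ((PySem.Str.split? line ":").getD []) 1).getD "")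
  let res := (PySem.List.enumerate text).foldl
      (fun (st : Int × List Int) (p : Int × String) =>
        let sets := ((PySem.Str.split? p.2 "|").getD []).map
            (fun x => PySem.Set.ofList (PySem.Str.split₀ (PySem.Str.strip x)))
        let winning : PySem.Set String := (PySem.List.pyGet? sets 0).getD PySem.Set.empty
        let numbers : PySem.Set String := (PySem.List.pyGet? sets 1).getD PySem.Set.empty
        if PySem.Set.len (PySem.Set.inter winning numbers) ≠ 0 then
          (st.1 + 2 ^ (PySem.Set.len (PySem.Set.inter winning numbers) - 1).toNat,
           (PySem.List.pyRange 1 (PySem.Set.len (PySem.Set.inter winning numbers) + 1)).foldl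
             (fun a nn => PySem.List.pySetD a (p.1 + nn)
                 (PySem.List.pyGetD a (p.1 + nn) 0 + PySem.List.pyGetD a p.1 0)) st.2)
        else st)
      (0, List.replicate text.length (1 : Int))
  (res.1, res.2.sum)

-- ===== PORT B =====
def solve_alt (input_data : String) : Int × Int :=
  let matchList := ((PySem.Str.split? input_data "\n").getD []).map
      (fun line =>
        let games := (PySem.List.pyGet? ((PySem.Str.split? line ":").getD []) 1).getD ""
        let sets := ((PySem.Str.split? games "|").getD []).map
            (fun x => PySem.Set.ofList (PySem.Str.split₀ (PySem.Str.strip x)))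
        PySem.Set.len (PySem.Set.inter
          ((PySem.List.pyGet? sets 0).getD PySem.Set.empty)
          ((PySem.List.pyGet? sets 1).getD PySem.Set.empty)))
  let part1 := (matchList.filter (fun m => m ≠ 0)).foldl (fun s m => s + 2 ^ (m - 1).toNat) (0 : Int)
  let n := matchList.length
  let counts := (PySem.List.pyRange ((n : Int) - 1) (-1) (-1)).foldl
      (fun c i => PySem.List.pySetD c i
          (1 + (PySem.List.slice c (some (i + 1)) (some (i + 1 + PySem.List.pyGetD matchList i 0))).sum))
      (List.replicate n (0 : Int))
  (part1, counts.sum)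

-- ===== PRECONDITION & SPEC =====
-- helpers used only to state Pre_/Raises_ (the same parsing both Pythons perform per line)
def pvLines (input_data : String) : List String := (PySem.Str.split? input_data "\n").getD []

def pvGames (line : String) : String :=
  (PySem.List.pyGet? ((PySem.Str.split? line ":").getD []) 1).getD ""

def pvMatch (line : String) : Int :=
  let sets := ((PySem.Str.split? (pvGames line) "|").getD []).map
      (fun x => PySem.Set.ofList (PySem.Str.split₀ (PySem.Str.strip x)))
  PySem.Set.len (PySem.Set.inter
    ((PySem.List.pyGet? sets 0).getD PySem.Set.empty)
    ((PySem.List.pyGet? sets 1).getD PySem.Set.empty))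

def pvParseOk (input_data : String) : Prop :=
  ∀ line ∈ pvLines input_data,
    2 ≤ ((PySem.Str.split? line ":").getD []).length ∧
    ((PySem.Str.split? (pvGames line) "|").getD []).length = 2

def pvNoOverrun (input_data : String) : Prop :=
  ∀ i < (pvLines input_data).length,
    ((i : Int) + pvMatch ((pvLines input_data).getD i "") : Int) < ((pvLines input_data).length : Int)

-- Pre_ = exactly the inputs where Python A returns: every line has a ':' and exactly one '|'
-- after it (else IndexError/ValueError while parsing), and no card's match count runs past the
-- last card (else IndexError writing part2[i+n]).
def Pre_solve (input_data : String) : Prop := pvParseOk input_data ∧ pvNoOverrun input_data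
instance (input_data : String) : Decidable (Pre_solve input_data) := by
  unfold Pre_solve pvParseOk pvNoOverrun; infer_instance

def pvWitness_solve : String := "a:|"

-- On inputs that parse but where some card's match count runs past the last card, A raises
-- IndexError writing part2[i+n] while B's backward slice clamps and returns the totals for
-- the cards that exist.
def Raises_solve (input_data : String) : Prop := pvParseOk input_data ∧ ¬ pvNoOverrun input_data
instance (input_data : String) : Decidable (Raises_solve input_data) := by
  unfold Raises_solve pvParseOk pvNoOverrun; infer_instance

def pvRaiseWitness_solve : String := "A: 1 | 1"
def pvRaiseWitnessOut_solve : Int × Int := (1, 1)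

def Spec_solve (input_data : String) (out : Int × Int) : Prop := out = solve_alt input_data
instance (input_data : String) (out : Int × Int) : Decidable (Spec_solve input_data out) := by
  unfold Spec_solve; infer_instance

-- ===== CLAIM (what is proved, stated in full; the proofs are below) =====
def Claim_equal_solve : Prop :=
  ∀ (input_data : String), Dom_solve input_data → Pre_solve input_data →
    Spec_solve input_data (solve input_data)

def Claim_raises_solve : Prop :=
  (∀ (input_data : String), Dom_solve input_data → Raises_solve input_data → ¬ Pre_solve input_data) ∧
  (Dom_solve pvRaiseWitness_solve ∧ Raises_solve pvRaiseWitness_solve ∧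
    solve_alt pvRaiseWitness_solve = pvRaiseWitnessOut_solve)

-- ===== LEMMAS AND PROOFS =====

-- abstracted pieces (proof-side only)
-- the literal body of port A's per-card fold (games string still unparsed in p.2)
def pvCardStep (st : Int × List Int) (p : Int × String) : Int × List Int :=
  let sets := ((PySem.Str.split? p.2 "|").getD []).map
      (fun x => PySem.Set.ofList (PySem.Str.split₀ (PySem.Str.strip x)))
  let winning : PySem.Set String := (PySem.List.pyGet? sets 0).getD PySem.Set.empty
  let numbers : PySem.Set String := (PySem.List.pyGet? sets 1).getD PySem.Set.empty
  if PySem.Set.len (PySem.Set.inter winning numbers) ≠ 0 then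
    (st.1 + 2 ^ (PySem.Set.len (PySem.Set.inter winning numbers) - 1).toNat,
     (PySem.List.pyRange 1 (PySem.Set.len (PySem.Set.inter winning numbers) + 1)).foldl
       (fun a nn => PySem.List.pySetD a (p.1 + nn)
           (PySem.List.pyGetD a (p.1 + nn) 0 + PySem.List.pyGetD a p.1 0)) st.2)
  else st

def pvRangeAdd (a : List Int) (i : Int) (m : Int) : List Int :=
  (PySem.List.pyRange 1 (m + 1)).foldl
    (fun a nn => PySem.List.pySetD a (i + nn)
        (PySem.List.pyGetD a (i + nn) 0 + PySem.List.pyGetD a i 0)) a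

def pvStepA (a : List Int) (p : Int × Int) : List Int :=
  if p.2 ≠ 0 then pvRangeAdd a p.1 p.2 else a

def pvStepB (M : List Int) (c : List Int) (i : Int) : List Int :=
  PySem.List.pySetD c i
    (1 + (PySem.List.slice c (some (i + 1)) (some (i + 1 + PySem.List.pyGetD M i 0))).sum)

-- sums of list segments as Finset sums
lemma pv_sum_take (xs : List Int) (b : Nat) :
    (xs.take b).sum = ∑ j ∈ Finset.range b, xs.getD j 0 := by
  induction b with
  | zero => simp
  | succ b ih =>
    rw [Finset.sum_range_succ, ← ih, List.take_succ]
    cases h : xs[b]? <;> simp [h, List.getD_eq_getElem?_getD]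

lemma pv_sum_eq (xs : List Int) : xs.sum = ∑ j ∈ Finset.range xs.length, xs.getD j 0 := by
  rw [← pv_sum_take, List.take_length]

lemma pv_getD_drop (xs : List Int) (a t : Nat) : (xs.drop a).getD t 0 = xs.getD (a + t) 0 := by
  simp [List.getD_eq_getElem?_getD, List.getElem?_drop]

lemma pv_sum_drop_take (xs : List Int) (a b : Nat) :
    ((xs.drop a).take b).sum = ∑ j ∈ Finset.Ico a (a + b), xs.getD j 0 := by
  rw [pv_sum_take, Finset.sum_Ico_eq_sum_range]
  simp only [Nat.add_sub_cancel_left]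
  exact Finset.sum_congr rfl (fun t _ => pv_getD_drop xs a t)

lemma pv_drop_eq_of_getD (xs ys : List Int) (h : xs.length = ys.length) (k : Nat)
    (hp : ∀ j, k ≤ j → xs.getD j 0 = ys.getD j 0) : xs.drop k = ys.drop k := by
  apply List.ext_getElem (by simp [h])
  intro i h1 h2
  have e := hp (k + i) (Nat.le_add_right _ _)
  rw [List.getD_eq_getElem (hn := by simp at h1; omega),
      List.getD_eq_getElem (hn := by simp [← h] at h2; omega)] at e
  simpa [List.getElem_drop] using e

lemma pv_length_pvRangeAdd (a : List Int) (i m : Int) : (pvRangeAdd a i m).length = a.length := by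
  unfold pvRangeAdd
  generalize PySem.List.pyRange 1 (m + 1) = l
  induction l generalizing a with
  | nil => rfl
  | cons x l ih => simp [List.foldl_cons, ih, PySem.List.length_pySetD]

lemma pvRangeAdd_succ (a : List Int) (i : Int) (m : Nat) :
    pvRangeAdd a i ((m + 1 : Nat) : Int) =
      PySem.List.pySetD (pvRangeAdd a i (m : Int)) (i + ((m : Int) + 1))
        (PySem.List.pyGetD (pvRangeAdd a i (m : Int)) (i + ((m : Int) + 1)) 0 +
          PySem.List.pyGetD (pvRangeAdd a i (m : Int)) i 0) := by
  unfold pvRangeAdd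
  have h : ((m + 1 : Nat) : Int) + 1 = ((m : Int) + 1) + 1 := by push_cast; ring
  rw [h, PySem.List.pyRange_one_succ_right (by omega : (1 : Int) ≤ (m : Int) + 1),
      List.foldl_append]
  rfl

lemma pv_pvRangeAdd_getD (a : List Int) (k m : Nat) :
    ∀ (_ : k + m < a.length) (j : Nat),
    (pvRangeAdd a (k : Int) (m : Int)).getD j 0 =
      if k < j ∧ j ≤ k + m then a.getD j 0 + a.getD k 0 else a.getD j 0 := by
  induction m with
  | zero =>
    intro hlen j
    have h0 : pvRangeAdd a (k : Int) ((0 : Nat) : Int) = a := by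
      unfold pvRangeAdd
      rw [show ((0 : Nat) : Int) + 1 = 1 by norm_num,
          PySem.List.pyRange_one_eq_nil (le_refl 1)]
      rfl
    rw [h0, if_neg (by omega)]
  | succ m ih =>
    intro hlen j
    have hml : k + m < a.length := by omega
    rw [pvRangeAdd_succ]
    have hcast : ((k : Int) + ((m : Int) + 1)) = ((k + m + 1 : Nat) : Int) := by push_cast; ring
    rw [hcast, PySem.List.pySetD_natCast, PySem.List.pyGetD_natCast, PySem.List.pyGetD_natCast]
    have hlenA : (pvRangeAdd a (k : Int) (m : Int)).length = a.length :=
      pv_length_pvRangeAdd a _ _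
    have hAkm : (pvRangeAdd a (k : Int) (m : Int)).getD (k + m + 1) 0 = a.getD (k + m + 1) 0 := by
      rw [ih hml, if_neg (by omega)]
    have hAk : (pvRangeAdd a (k : Int) (m : Int)).getD k 0 = a.getD k 0 := by
      rw [ih hml, if_neg (by omega)]
    rw [hAkm, hAk]
    by_cases hj : j = k + m + 1
    · subst hj
      rw [List.getD_eq_getElem?_getD, List.getElem?_set, if_pos rfl,
          if_pos (by omega : k + m + 1 < (pvRangeAdd a (k : Int) (m : Int)).length)]
      rw [if_pos (by omega)]
      rfl
    · rw [List.getD_eq_getElem?_getD, List.getElem?_set, if_neg (fun h => hj h.symm),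
          ← List.getD_eq_getElem?_getD, ih hml]
      split_ifs <;> first | rfl | omega

-- B's backward fold: characterization of the final counts list
lemma pv_bwd (M : List Int) (k : Nat) (hk : k ≤ M.length) (c : List Int)
    (hc : c.length = M.length) (hM : ∀ j, 0 ≤ M.getD j 0) :
    ((PySem.List.pyRange ((k : Int) - 1) (-1) (-1)).foldl (pvStepB M) c).length = M.length ∧
    (∀ j, k ≤ j →
      ((PySem.List.pyRange ((k : Int) - 1) (-1) (-1)).foldl (pvStepB M) c).getD j 0 = c.getD j 0) ∧
    (∀ j, j < k →
      ((PySem.List.pyRange ((k : Int) - 1) (-1) (-1)).foldl (pvStepB M) c).getD j 0 =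
        1 + ((((PySem.List.pyRange ((k : Int) - 1) (-1) (-1)).foldl (pvStepB M) c).drop (j + 1)).take
              (M.getD j 0).toNat).sum) := by
  induction k generalizing c with
  | zero =>
    rw [show ((0 : Nat) : Int) - 1 = -1 by norm_num,
        PySem.List.pyRange_neg_one_eq_nil (le_refl (-1))]
    exact ⟨hc, fun j _ => rfl, fun j hj => absurd hj (by omega)⟩
  | succ k ih =>
    rw [show ((k + 1 : Nat) : Int) - 1 = (k : Int) by push_cast; ring,
        PySem.List.pyRange_neg_one_cons (by omega : (-1 : Int) < (k : Int)),
        List.foldl_cons]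
    have hlc' : (pvStepB M c (k : Int)).length = M.length := by
      unfold pvStepB; rw [PySem.List.length_pySetD]; exact hc
    obtain ⟨L1, L2, L3⟩ := ih (by omega) (pvStepB M c (k : Int)) hlc'
    have hgd : ∀ j, k + 1 ≤ j → (pvStepB M c (k : Int)).getD j 0 = c.getD j 0 := by
      intro j hj
      unfold pvStepB
      rw [PySem.List.pySetD_natCast, List.getD_eq_getElem?_getD, List.getElem?_set,
          if_neg (by omega), ← List.getD_eq_getElem?_getD]
    refine ⟨L1, ?_, ?_⟩
    · intro j hj
      rw [L2 j (by omega), hgd j hj]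
    · intro j hj
      rcases Nat.lt_or_ge j k with hjk | hjk
      · exact L3 j hjk
      · have hj' : j = k := by omega
        rw [hj']
        have hkn : k < M.length := by omega
        have hm := hM k
        rw [L2 k (le_refl k)]
        have hdrop :
            ((PySem.List.pyRange ((k : Int) - 1) (-1) (-1)).foldl (pvStepB M)
                (pvStepB M c (k : Int))).drop (k + 1) = c.drop (k + 1) := by
          have h1 := pv_drop_eq_of_getD _ _ (L1.trans hlc'.symm) (k + 1)
            (fun j hj => L2 j (by omega))
          have h2 := pv_drop_eq_of_getD _ _ (hlc'.trans hc.symm) (k + 1)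
            (fun j hj => hgd j hj)
          rw [h1, h2]
        rw [hdrop]
        unfold pvStepB
        rw [PySem.List.pySetD_natCast, List.getD_eq_getElem?_getD, List.getElem?_set,
            if_pos rfl, if_pos (by omega : k < c.length)]
        simp only [Option.getD_some]
        congr 1
        rw [PySem.List.pyGetD_natCast,
            show ((k : Int) + 1) = ((k + 1 : Nat) : Int) by push_cast; ring,
            show ((k + 1 : Nat) : Int) + M.getD k 0 =
              ((k + 1 : Nat) : Int) + (((M.getD k 0).toNat : Nat) : Int) by push_cast; omega,
            PySem.List.slice_natCast_add]

-- one step of A's forward propagation preserves the weighted sum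
lemma pv_phi_step (M C : List Int) (_hC : C.length = M.length)
    (hrec : ∀ j, j < M.length →
      C.getD j 0 = 1 + ((C.drop (j + 1)).take (M.getD j 0).toNat).sum)
    (a : List Int) (k : Nat) (ha : a.length = M.length) (hk : k < M.length)
    (hm : 0 ≤ M.getD k 0) (hov : ((k : Int) + M.getD k 0) < (M.length : Int)) :
    ((∑ j ∈ Finset.range (k + 1), (pvStepA a ((k : Int), M.getD k 0)).getD j 0) +
      ∑ j ∈ Finset.Ico (k + 1) M.length,
        (pvStepA a ((k : Int), M.getD k 0)).getD j 0 * C.getD j 0) =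
    (∑ j ∈ Finset.range k, a.getD j 0) +
      ∑ j ∈ Finset.Ico k M.length, a.getD j 0 * C.getD j 0 := by
  by_cases h0 : M.getD k 0 = 0
  · have hstep : pvStepA a ((k : Int), M.getD k 0) = a := by
      unfold pvStepA
      have h2 : ((k : Int), M.getD k 0).2 = 0 := h0
      rw [if_neg (fun hne => hne h2)]
    have hCk : C.getD k 0 = 1 := by
      have := hrec k hk
      rw [h0] at this
      simpa using this
    rw [hstep, Finset.sum_range_succ, Finset.sum_eq_sum_Ico_succ_bot hk, hCk]
    ring
  · have hmn : M.getD k 0 = (((M.getD k 0).toNat : Nat) : Int) := (Int.toNat_of_nonneg hm).symm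
    have hkmn : k + (M.getD k 0).toNat < M.length := by omega
    have hget : ∀ j, (pvStepA a ((k : Int), M.getD k 0)).getD j 0 =
        if k < j ∧ j ≤ k + (M.getD k 0).toNat then a.getD j 0 + a.getD k 0 else a.getD j 0 := by
      intro j
      have he : pvStepA a ((k : Int), M.getD k 0) =
          pvRangeAdd a (k : Int) (((M.getD k 0).toNat : Nat) : Int) := by
        unfold pvStepA
        rw [if_pos (by simpa using h0), ← hmn]
      rw [he]
      exact pv_pvRangeAdd_getD a k (M.getD k 0).toNat (by omega) j
    have e1 : ∑ j ∈ Finset.range k, (pvStepA a ((k : Int), M.getD k 0)).getD j 0 =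
        ∑ j ∈ Finset.range k, a.getD j 0 := by
      refine Finset.sum_congr rfl (fun j hj => ?_)
      rw [Finset.mem_range] at hj
      rw [hget j, if_neg (by omega)]
    have e2 : (pvStepA a ((k : Int), M.getD k 0)).getD k 0 = a.getD k 0 := by
      rw [hget k, if_neg (by omega)]
    have e3 : ∑ j ∈ Finset.Ico (k + 1) M.length,
        (pvStepA a ((k : Int), M.getD k 0)).getD j 0 * C.getD j 0 =
        ∑ j ∈ Finset.Ico (k + 1) M.length, (a.getD j 0 * C.getD j 0 +
          if j ≤ k + (M.getD k 0).toNat then a.getD k 0 * C.getD j 0 else 0) := by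
      refine Finset.sum_congr rfl (fun j hj => ?_)
      rw [Finset.mem_Ico] at hj
      rw [hget j]
      by_cases h2 : j ≤ k + (M.getD k 0).toNat
      · rw [if_pos ⟨by omega, h2⟩, if_pos h2]; ring
      · rw [if_neg (by omega), if_neg h2]; ring
    have e4 : ∑ j ∈ Finset.Ico (k + 1) M.length,
        (if j ≤ k + (M.getD k 0).toNat then a.getD k 0 * C.getD j 0 else 0) =
        a.getD k 0 * (C.getD k 0 - 1) := by
      rw [← Finset.sum_Ico_consecutive _
            (by omega : k + 1 ≤ k + 1 + (M.getD k 0).toNat)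
            (by omega : k + 1 + (M.getD k 0).toNat ≤ M.length)]
      have z : ∑ j ∈ Finset.Ico (k + 1 + (M.getD k 0).toNat) M.length,
          (if j ≤ k + (M.getD k 0).toNat then a.getD k 0 * C.getD j 0 else 0) = 0 := by
        refine Finset.sum_eq_zero (fun j hj => ?_)
        rw [Finset.mem_Ico] at hj
        rw [if_neg (by omega)]
      have o : ∑ j ∈ Finset.Ico (k + 1) (k + 1 + (M.getD k 0).toNat)
            , (if j ≤ k + (M.getD k 0).toNat then a.getD k 0 * C.getD j 0 else 0) =
          a.getD k 0 * ∑ j ∈ Finset.Ico (k + 1) (k + 1 + (M.getD k 0).toNat), C.getD j 0 := by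
        rw [Finset.mul_sum]
        refine Finset.sum_congr rfl (fun j hj => ?_)
        rw [Finset.mem_Ico] at hj
        rw [if_pos (by omega)]
      rw [z, o, add_zero]
      have hr := hrec k hk
      rw [pv_sum_drop_take] at hr
      have hs : ∑ j ∈ Finset.Ico (k + 1) (k + 1 + (M.getD k 0).toNat), C.getD j 0 =
          C.getD k 0 - 1 := by omega
      rw [hs]
    rw [Finset.sum_range_succ, Finset.sum_eq_sum_Ico_succ_bot hk, e1, e2, e3,
        Finset.sum_add_distrib, e4]
    ring

-- the invariant over A's whole forward fold
lemma pv_inv (M C : List Int) (hC : C.length = M.length)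
    (hrec : ∀ j, j < M.length →
      C.getD j 0 = 1 + ((C.drop (j + 1)).take (M.getD j 0).toNat).sum)
    (hM : ∀ j, 0 ≤ M.getD j 0)
    (hov : ∀ i, i < M.length → ((i : Int) + M.getD i 0) < (M.length : Int)) :
    ∀ (suf : List Int) (k : Nat) (a : List Int), a.length = M.length → suf = M.drop k →
      ((PySem.List.enumerate suf (k : Int)).foldl pvStepA a).sum =
        (∑ j ∈ Finset.range k, a.getD j 0) +
          ∑ j ∈ Finset.Ico k M.length, a.getD j 0 * C.getD j 0 := by
  intro suf
  induction suf with
  | nil =>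
    intro k a ha hsuf
    have hnk : M.length ≤ k := by
      have := congrArg List.length hsuf
      simp [List.length_drop] at this
      omega
    rw [PySem.List.enumerate_nil, List.foldl_nil,
        Finset.Ico_eq_empty (by omega), Finset.sum_empty, add_zero,
        ← pv_sum_take, List.take_of_length_le (by omega)]
  | cons m suf' ih =>
    intro k a ha hsuf
    have hk : k < M.length := by
      have := congrArg List.length hsuf
      simp [List.length_drop] at this
      omega
    have hm0 : m = M.getD k 0 := by
      have h := congrArg (fun l => l.getD 0 (0 : Int)) hsuf
      simp only [List.getD_cons_zero] at h
      rw [pv_getD_drop, Nat.add_zero] at h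
      exact h
    have hsuf' : suf' = M.drop (k + 1) := by
      have h := congrArg List.tail hsuf
      simp only [List.tail_cons] at h
      rw [h, List.tail_drop]
    have hlen' : (pvStepA a ((k : Int), m)).length = M.length := by
      unfold pvStepA
      split_ifs
      · rw [pv_length_pvRangeAdd]; exact ha
      · exact ha
    rw [PySem.List.enumerate_cons, List.foldl_cons,
        show (k : Int) + 1 = ((k + 1 : Nat) : Int) by push_cast; ring,
        ih (k + 1) (pvStepA a ((k : Int), m)) hlen' hsuf', hm0]
    exact pv_phi_step M C hC hrec a k ha hk (hM k) (hov k hk)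

-- port-shape lemmas
lemma pv_enumerate_map {α β : Type} (f : α → β) (xs : List α) (s : Int) :
    PySem.List.enumerate (xs.map f) s =
      (PySem.List.enumerate xs s).map (fun p => (p.1, f p.2)) := by
  induction xs generalizing s with
  | nil => simp [PySem.List.enumerate_nil]
  | cons x xs ih => simp [PySem.List.enumerate_cons, ih]

lemma pv_foldAB (v : String → Int) (l : List (Int × String)) (s : Int) (a : List Int) :
    l.foldl (fun (st : Int × List Int) q =>
        if v q.2 ≠ 0 then
          (st.1 + 2 ^ (v q.2 - 1).toNat,
           (PySem.List.pyRange 1 (v q.2 + 1)).foldl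
             (fun a nn => PySem.List.pySetD a (q.1 + nn)
                 (PySem.List.pyGetD a (q.1 + nn) 0 + PySem.List.pyGetD a q.1 0)) st.2)
        else st) (s, a) =
      (l.foldl (fun s q => if v q.2 ≠ 0 then s + 2 ^ (v q.2 - 1).toNat else s) s,
       l.foldl (fun a q => pvStepA a (q.1, v q.2)) a) := by
  induction l generalizing s a with
  | nil => rfl
  | cons q l ih =>
    simp only [List.foldl_cons]
    by_cases h : v q.2 = 0
    · rw [if_neg (by simp [h]),
          show pvStepA a (q.1, v q.2) = a by unfold pvStepA; rw [if_neg (by simp [h])],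
          ih, if_neg (by simp [h])]
    · rw [if_pos (by simpa using h), ih, if_pos (by simpa using h),
          show pvStepA a (q.1, v q.2) =
              (PySem.List.pyRange 1 (v q.2 + 1)).foldl
                (fun a nn => PySem.List.pySetD a (q.1 + nn)
                    (PySem.List.pyGetD a (q.1 + nn) 0 + PySem.List.pyGetD a q.1 0)) a
            by unfold pvStepA; rw [if_pos (by simpa using h)]; rfl]

lemma pv_filter_fold (L : List Int) (s : Int) :
    (L.filter (fun m => m ≠ 0)).foldl (fun s m => s + 2 ^ (m - 1).toNat) s =
      L.foldl (fun s m => if m ≠ 0 then s + 2 ^ (m - 1).toNat else s) s := by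
  induction L generalizing s with
  | nil => rfl
  | cons m L ih =>
    rw [List.filter_cons, List.foldl_cons]
    by_cases h : m = 0
    · simp only [h]
      rw [if_neg (by simp), ih]
      simp
    · rw [if_pos (by simpa using h), List.foldl_cons, ih, if_pos (by simpa using h)]

lemma pv_foldl_enumerate_snd {α : Type} (g : Int → α → Int) (xs : List α) (s0 : Int) (acc : Int) :
    (PySem.List.enumerate xs s0).foldl (fun acc q => g acc q.2) acc = xs.foldl g acc := by
  induction xs generalizing s0 acc with
  | nil => rfl
  | cons x xs ih => rw [PySem.List.enumerate_cons, List.foldl_cons, List.foldl_cons, ih]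

lemma pvMatch_nonneg (line : String) : 0 ≤ pvMatch line := by
  unfold pvMatch
  exact Int.natCast_nonneg _

-- ===== VERDICT (by name: the statement is the Claim_ definition above) =====
theorem solve_spec : Claim_equal_solve := by
  intro input _ hpre
  unfold Spec_solve
  obtain ⟨_, hov⟩ := hpre
  unfold pvNoOverrun at hov
  have hA : solve input =
      (((PySem.List.enumerate ((pvLines input).map pvGames) 0).foldl pvCardStep
          (0, List.replicate ((pvLines input).map pvGames).length 1)).1,
       ((PySem.List.enumerate ((pvLines input).map pvGames) 0).foldl pvCardStep
          (0, List.replicate ((pvLines input).map pvGames).length 1)).2.sum) := rfl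
  have hbody : (fun (st : Int × List Int) (q : Int × String) =>
        pvCardStep st (q.1, pvGames q.2)) =
      (fun (st : Int × List Int) q =>
        if pvMatch q.2 ≠ 0 then
          (st.1 + 2 ^ (pvMatch q.2 - 1).toNat,
           (PySem.List.pyRange 1 (pvMatch q.2 + 1)).foldl
             (fun a nn => PySem.List.pySetD a (q.1 + nn)
                 (PySem.List.pyGetD a (q.1 + nn) 0 + PySem.List.pyGetD a q.1 0)) st.2)
        else st) := rfl
  rw [hA, pv_enumerate_map, List.foldl_map, List.length_map]
  have hmap : (fun (st : Int × List Int) (q : Int × String) =>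
        pvCardStep st ((fun p => (p.1, pvGames p.2)) q)) =
      (fun (st : Int × List Int) (q : Int × String) => pvCardStep st (q.1, pvGames q.2)) := rfl
  rw [hmap, hbody, pv_foldAB pvMatch]
  have hB : solve_alt input =
      (((((pvLines input).map pvMatch).filter (fun m => m ≠ 0)).foldl
          (fun s m => s + 2 ^ (m - 1).toNat) 0,
        ((PySem.List.pyRange ((((pvLines input).map pvMatch).length : Int) - 1) (-1) (-1)).foldl
            (pvStepB ((pvLines input).map pvMatch))
            (List.replicate ((pvLines input).map pvMatch).length 0)).sum)) := rfl
  rw [hB, pv_filter_fold, List.foldl_map]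
  -- facts about M and C
  have hMnn : ∀ j, 0 ≤ ((pvLines input).map pvMatch).getD j 0 := by
    intro j
    by_cases hj : j < ((pvLines input).map pvMatch).length
    · rw [List.getD_eq_getElem _ _ hj]
      rw [List.length_map] at hj
      rw [List.getElem_map]
      exact pvMatch_nonneg _
    · rw [List.getD_eq_default _ _ (by omega)]
  have hov' : ∀ i, i < ((pvLines input).map pvMatch).length →
      ((i : Int) + ((pvLines input).map pvMatch).getD i 0) <
        (((pvLines input).map pvMatch).length : Int) := by
    intro i hi
    rw [List.length_map] at hi ⊢
    have hgd : ((pvLines input).map pvMatch).getD i 0 = pvMatch ((pvLines input).getD i "") := by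
      rw [List.getD_eq_getElem _ _ (by rw [List.length_map]; exact hi), List.getElem_map,
          List.getD_eq_getElem _ _ hi]
    rw [hgd]
    exact hov i hi
  obtain ⟨hCl, -, hCrec⟩ := pv_bwd ((pvLines input).map pvMatch)
      ((pvLines input).map pvMatch).length le_rfl
      (List.replicate ((pvLines input).map pvMatch).length 0) (by simp) hMnn
  refine Prod.ext ?_ ?_
  · exact pv_foldl_enumerate_snd
      (fun x y => if pvMatch y ≠ 0 then x + 2 ^ (pvMatch y - 1).toNat else x)
      (pvLines input) 0 0
  -- the part2 components
  have hinv := pv_inv ((pvLines input).map pvMatch) _ hCl hCrec hMnn hov'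
      ((pvLines input).map pvMatch) 0
      (List.replicate ((pvLines input).map pvMatch).length 1) (by simp) (by simp)
  simp only [Nat.cast_zero, Finset.range_zero, Finset.sum_empty, zero_add] at hinv
  rw [pv_enumerate_map pvMatch (pvLines input) 0, List.foldl_map] at hinv
  rw [List.length_map] at hCl
  rw [List.length_map] at hinv ⊢
  rw [hinv]
  dsimp only
  have hmid : ∑ j ∈ Finset.Ico 0 (pvLines input).length,
      (List.replicate (pvLines input).length (1 : Int)).getD j 0 *
        (List.foldl (pvStepB (List.map pvMatch (pvLines input)))
            (List.replicate (pvLines input).length 0)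
            (PySem.List.pyRange (((pvLines input).length : Int) - 1) (-1) (-1))).getD j 0 =
      ∑ j ∈ Finset.Ico 0 (pvLines input).length,
        (List.foldl (pvStepB (List.map pvMatch (pvLines input)))
            (List.replicate (pvLines input).length 0)
            (PySem.List.pyRange (((pvLines input).length : Int) - 1) (-1) (-1))).getD j 0 := by
    refine Finset.sum_congr rfl (fun j hj => ?_)
    rw [Finset.mem_Ico] at hj
    rw [List.getD_eq_getElem _ _ (by simpa using hj.2), List.getElem_replicate, one_mul]
  rw [hmid, ← Finset.range_eq_Ico, pv_sum_eq, hCl]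

@[simp] theorem solve_raises : Claim_raises_solve := by
  unfold Claim_raises_solve
  refine ⟨fun input _ hr hp => ?_, by decide⟩
  exact hr.2 hp.2
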